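-- pv_equiv track=rewrite | github.com/jrfdy6/closetgptrenew | backend/src/services/item_utils/formality.py | get_context_formality_level
-- ===== SOURCE A (Python) =====
-- from typing import Optional, Any
--
-- def get_context_formality_level(occasion: str, style: str) -> Optional[int]:
--     """
--     Get target formality level from occasion and style.
--
--     Returns:
--         0 = casual
--         1 = smart casual
--         2 = business casual
--         3 = formal
--         4 = black tie
--     """
--     occasion_lower = (occasion or '').lower()
--     style_lower = (style or '').lower()
--
--     # Occasion-based formality (highest priority)
--     if any(kw in occasion_lower for kw in ['gala', 'black tie', 'wedding formal']):
--         return 4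
--     elif any(kw in occasion_lower for kw in ['interview', 'business', 'formal', 'conference']):
--         return 3
--     elif any(kw in occasion_lower for kw in ['business casual', 'date', 'brunch']):
--         return 2
--     elif any(kw in occasion_lower for kw in ['smart casual', 'weekend']):
--         return 1
--
--     # Style-based formality (if occasion is neutral)
--     if any(kw in style_lower for kw in ['formal', 'classic', 'preppy', 'old money']):
--         return 3
--     elif any(kw in style_lower for kw in ['business casual', 'urban professional']):
--         return 2
--     elif any(kw in style_lower for kw in ['smart', 'minimalist']):
--         return 1
--     else:
--         return 0
-- ===== SOURCE B (Python) =====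
-- OCC_LEVEL = {
--     'gala': 4, 'black tie': 4, 'wedding formal': 4,
--     'interview': 3, 'business': 3, 'formal': 3, 'conference': 3,
--     'business casual': 2, 'date': 2, 'brunch': 2,
--     'smart casual': 1, 'weekend': 1,
-- }
--
-- STY_LEVEL = {
--     'formal': 3, 'classic': 3, 'preppy': 3, 'old money': 3,
--     'business casual': 2, 'urban professional': 2,
--     'smart': 1, 'minimalist': 1,
-- }
--
-- def get_context_formality_level(occasion: str, style: str):
--     # Max matched level is equivalent to A's priority chain because each
--     # table lists its levels in decreasing order of priority.
--     occ = (occasion or '').lower()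
--     hits = [lvl for kw, lvl in OCC_LEVEL.items() if kw in occ]
--     if hits:
--         return max(hits)
--     sty = (style or '').lower()
--     hits = [lvl for kw, lvl in STY_LEVEL.items() if kw in sty]
--     return max(hits) if hits else 0
-- ===== Notes on version B (the rewrite author's own statement) =====
-- stated objective: alternative
-- what changed: Replaces A's ordered if/elif first-match priority chain by an order-independent aggregation: a flat keyword-to-level map per table, returning the maximum level among all matching keywords (equivalent since each table's levels are listed in decreasing order).
import Mathlib
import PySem

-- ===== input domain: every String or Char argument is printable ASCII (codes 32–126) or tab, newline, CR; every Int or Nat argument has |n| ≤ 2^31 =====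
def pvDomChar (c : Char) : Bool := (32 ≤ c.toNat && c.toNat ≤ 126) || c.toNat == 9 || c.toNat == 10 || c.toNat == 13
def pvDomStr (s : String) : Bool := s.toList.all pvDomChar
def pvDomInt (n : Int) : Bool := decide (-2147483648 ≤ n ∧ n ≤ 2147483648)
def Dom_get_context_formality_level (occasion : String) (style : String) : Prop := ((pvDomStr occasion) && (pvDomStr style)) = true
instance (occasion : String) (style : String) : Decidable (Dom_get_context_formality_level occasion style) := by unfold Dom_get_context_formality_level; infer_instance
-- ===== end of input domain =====

-- B replaces A's ordered first-match if/elif chain by an order-independent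
-- aggregation: max matched level over a flat keyword->level table (objective: alternative; same cost).

-- ===== PORT A =====
-- literal transliteration of A's if/elif chain; 'kw in s' is PySem.Str.isIn
def get_context_formality_level (occasion : String) (style : String) : Option Int :=
  let occasion_lower := PySem.Str.lower occasion
  let style_lower := PySem.Str.lower style
  if ["gala", "black tie", "wedding formal"].any (fun kw => PySem.Str.isIn kw occasion_lower) then
    some 4
  else if ["interview", "business", "formal", "conference"].any (fun kw => PySem.Str.isIn kw occasion_lower) then
    some 3
  else if ["business casual", "date", "brunch"].any (fun kw => PySem.Str.isIn kw occasion_lower) then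
    some 2
  else if ["smart casual", "weekend"].any (fun kw => PySem.Str.isIn kw occasion_lower) then
    some 1
  else if ["formal", "classic", "preppy", "old money"].any (fun kw => PySem.Str.isIn kw style_lower) then
    some 3
  else if ["business casual", "urban professional"].any (fun kw => PySem.Str.isIn kw style_lower) then
    some 2
  else if ["smart", "minimalist"].any (fun kw => PySem.Str.isIn kw style_lower) then
    some 1
  else
    some 0

-- ===== PORT B =====
-- flat keyword -> level maps (Python dicts in insertion order)
def pvOccLevel : List (String × Int) :=
  [("gala", 4), ("black tie", 4), ("wedding formal", 4),
   ("interview", 3), ("business", 3), ("formal", 3), ("conference", 3),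
   ("business casual", 2), ("date", 2), ("brunch", 2),
   ("smart casual", 1), ("weekend", 1)]

def pvStyLevel : List (String × Int) :=
  [("formal", 3), ("classic", 3), ("preppy", 3), ("old money", 3),
   ("business casual", 2), ("urban professional", 2),
   ("smart", 1), ("minimalist", 1)]

-- the list comprehension [lvl for kw,lvl in TABLE.items() if kw in text]
def pvHits (text : String) (table : List (String × Int)) : List Int :=
  (table.filter (fun p => PySem.Str.isIn p.1 text)).map (fun p => p.2)

-- Python's max over a nonempty list of ints
def pvMaxHits (hits : List Int) : Option Int :=
  match hits with
  | [] => none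
  | h :: t => some (t.foldl max h)

def get_context_formality_level_alt (occasion : String) (style : String) : Option Int :=
  let occ := PySem.Str.lower occasion
  match pvMaxHits (pvHits occ pvOccLevel) with
  | some m => some m
  | none =>
      let sty := PySem.Str.lower style
      match pvMaxHits (pvHits sty pvStyLevel) with
      | some m => some m
      | none => some 0

-- ===== PRECONDITION & SPEC =====
def Spec_get_context_formality_level (occasion : String) (style : String) (out : Option Int) : Prop := out = get_context_formality_level_alt occasion style
instance (occasion : String) (style : String) (out : Option Int) : Decidable (Spec_get_context_formality_level occasion style out) := by unfold Spec_get_context_formality_level; infer_instance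

-- ===== CLAIM =====
def Claim_equal_get_context_formality_level : Prop := ∀ (occasion : String) (style : String), Dom_get_context_formality_level occasion style → Spec_get_context_formality_level occasion style (get_context_formality_level occasion style)

-- ===== LEMMAS AND PROOFS =====

-- max-of-matches over each table equals its decreasing priority chain, for any membership predicate
set_option maxHeartbeats 4000000 in
theorem pv_occ_q (q : String → Bool) :
    pvMaxHits ((pvOccLevel.filter (fun p => q p.1)).map (fun p => p.2))
    = (if q "gala" || q "black tie" || q "wedding formal" then some 4
       else if q "interview" || q "business" || q "formal" || q "conference" then some 3
       else if q "business casual" || q "date" || q "brunch" then some 2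
       else if q "smart casual" || q "weekend" then some 1 else none) := by
  simp only [pvOccLevel, List.filter, List.map]
  generalize q "gala" = b1
  generalize q "black tie" = b2
  generalize q "wedding formal" = b3
  generalize q "interview" = b4
  generalize q "business" = b5
  generalize q "formal" = b6
  generalize q "conference" = b7
  generalize q "business casual" = b8
  generalize q "date" = b9
  generalize q "brunch" = b10
  generalize q "smart casual" = b11
  generalize q "weekend" = b12
  revert b1 b2 b3 b4 b5 b6 b7 b8 b9 b10 b11 b12
  decide

set_option maxHeartbeats 1000000 in
theorem pv_sty_q (q : String → Bool) :
    pvMaxHits ((pvStyLevel.filter (fun p => q p.1)).map (fun p => p.2))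
    = (if q "formal" || q "classic" || q "preppy" || q "old money" then some 3
       else if q "business casual" || q "urban professional" then some 2
       else if q "smart" || q "minimalist" then some 1 else none) := by
  simp only [pvStyLevel, List.filter, List.map]
  generalize q "formal" = c1
  generalize q "classic" = c2
  generalize q "preppy" = c3
  generalize q "old money" = c4
  generalize q "business casual" = c5
  generalize q "urban professional" = c6
  generalize q "smart" = c7
  generalize q "minimalist" = c8
  revert c1 c2 c3 c4 c5 c6 c7 c8
  decide

theorem pv_occ_eq (t : String) :
    pvMaxHits (pvHits t pvOccLevel)
    = (if PySem.Str.isIn "gala" t || PySem.Str.isIn "black tie" t || PySem.Str.isIn "wedding formal" t then some 4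
       else if PySem.Str.isIn "interview" t || PySem.Str.isIn "business" t || PySem.Str.isIn "formal" t || PySem.Str.isIn "conference" t then some 3
       else if PySem.Str.isIn "business casual" t || PySem.Str.isIn "date" t || PySem.Str.isIn "brunch" t then some 2
       else if PySem.Str.isIn "smart casual" t || PySem.Str.isIn "weekend" t then some 1
       else none) := by
  simpa [pvHits] using pv_occ_q (fun kw => PySem.Str.isIn kw t)

theorem pv_sty_eq (t : String) :
    pvMaxHits (pvHits t pvStyLevel)
    = (if PySem.Str.isIn "formal" t || PySem.Str.isIn "classic" t || PySem.Str.isIn "preppy" t || PySem.Str.isIn "old money" t then some 3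
       else if PySem.Str.isIn "business casual" t || PySem.Str.isIn "urban professional" t then some 2
       else if PySem.Str.isIn "smart" t || PySem.Str.isIn "minimalist" t then some 1
       else none) := by
  simpa [pvHits] using pv_sty_q (fun kw => PySem.Str.isIn kw t)

-- ===== VERDICT =====
theorem get_context_formality_level_spec : Claim_equal_get_context_formality_level := by
  intro occasion style _
  unfold Spec_get_context_formality_level get_context_formality_level get_context_formality_level_alt
  dsimp only
  rw [pv_occ_eq, pv_sty_eq]
  simp only [List.any, Bool.or_false, Bool.or_assoc]
  split_ifs <;> rfl
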